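-- pv_equiv track=rewrite | github.com/akashbahai/rna_benchmarking | RNA3DB/preprocessing_latest.py | format_fragments
-- ===== SOURCE A (Python) =====
-- def format_fragments(residue_numbers):
--     fragments = []
--     current_fragment = []
--
--     for num in residue_numbers:
--         if not current_fragment or int(num) == int(current_fragment[-1]) + 1:
--             current_fragment.append(num)
--         else:
--             fragments.append(current_fragment)
--             current_fragment = [num]
--
--     if current_fragment:
--         fragments.append(current_fragment)
--
--     formatted_fragments = []
--     for fragment in fragments:
--         if len(fragment) > 1:
--             formatted_fragments.append(f"{fragment[0]}to{fragment[-1]}")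
--         else:
--             formatted_fragments.append(fragment[0])
--
--     return formatted_fragments
-- ===== SOURCE B (Python) =====
-- def format_fragments(residue_numbers):
--     # One streaming pass: keep only the raw start/last of the current run,
--     # emit each run's string at the break. A singleton run is exactly the
--     # case start == last (a longer run has int(last) > int(start)).
--     out = []
--     start = last = None
--     for num in residue_numbers:
--         if last is not None and int(num) != int(last) + 1:
--             out.append(start if start == last else f"{start}to{last}")
--             start = num
--         elif last is None:
--             start = num
--         last = num
--     if last is not None:
--         out.append(start if start == last else f"{start}to{last}")
--     return out
-- ===== Notes on version B (the rewrite author's own statement) =====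
-- stated objective: simpler
-- what changed: B replaces A's two passes (group residues into an intermediate list-of-lists, then format each fragment) with one streaming pass that keeps only the raw start/last strings of the current run and emits each run's formatted string at the break, detecting singleton runs by start == last instead of fragment length.
import Mathlib
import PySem

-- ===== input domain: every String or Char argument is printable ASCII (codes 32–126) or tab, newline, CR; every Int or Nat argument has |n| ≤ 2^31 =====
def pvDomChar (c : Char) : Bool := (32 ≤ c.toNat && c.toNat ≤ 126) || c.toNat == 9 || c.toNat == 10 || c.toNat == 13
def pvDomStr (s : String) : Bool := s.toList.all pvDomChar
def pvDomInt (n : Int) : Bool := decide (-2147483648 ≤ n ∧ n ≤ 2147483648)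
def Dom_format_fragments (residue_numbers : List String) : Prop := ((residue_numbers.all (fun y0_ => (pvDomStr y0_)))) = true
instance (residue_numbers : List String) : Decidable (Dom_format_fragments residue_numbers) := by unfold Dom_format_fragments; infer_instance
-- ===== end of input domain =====

-- B replaces A's two passes (group into a list-of-lists, then format) by one streaming
-- pass that keeps only the raw start/last of the current run (objective: simpler).

-- ===== PORT A =====
-- loop body of A's first for-loop (state: (fragments, current_fragment))
def pvStepA (st : List (List String) × List String) (num : String) :
    List (List String) × List String :=
  if st.2 = [] ∨ (PySem.Int.ofStr? num).getD 0 = (PySem.Int.ofStr? (st.2.getLast?.getD "")).getD 0 + 1 then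
    (st.1, st.2 ++ [num])
  else (st.1 ++ [st.2], [num])

-- body of A's second for-loop: format one fragment
def pvFmtA (fragment : List String) : String :=
  if 1 < fragment.length then fragment.headD "" ++ "to" ++ (fragment.getLast?.getD "")
  else fragment.headD ""

def format_fragments (residue_numbers : List String) : List String :=
  let st := residue_numbers.foldl pvStepA ([], [])
  let fragments := if st.2 = [] then st.1 else st.1 ++ [st.2]
  fragments.foldl (fun acc fragment => acc ++ [pvFmtA fragment]) []

-- ===== PORT B =====
-- B's run formatter: `start if start == last else f"{start}to{last}"`
def pvFmtB (start last : String) : String :=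
  if start = last then start else start ++ "to" ++ last

-- loop body of B's single pass (state: (out, none | some (start, last)))
def pvStepB (st : List String × Option (String × String)) (num : String) :
    List String × Option (String × String) :=
  match st.2 with
  | none => (st.1, some (num, num))
  | some (start, last) =>
    if (PySem.Int.ofStr? num).getD 0 ≠ (PySem.Int.ofStr? last).getD 0 + 1 then
      (st.1 ++ [pvFmtB start last], some (num, num))
    else (st.1, some (start, num))

def format_fragments_alt (residue_numbers : List String) : List String :=
  let st := residue_numbers.foldl pvStepB ([], none)
  match st.2 with
  | none => st.1
  | some (start, last) => st.1 ++ [pvFmtB start last]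

-- ===== PRECONDITION & SPEC =====
-- Python A calls int() on every element when the list has ≥ 2 elements and raises
-- ValueError on the first non-parsing one; a 0/1-element list always returns.
def Pre_format_fragments (residue_numbers : List String) : Prop :=
  residue_numbers.length ≤ 1 ∨ ∀ s ∈ residue_numbers, (PySem.Int.ofStr? s).isSome
instance (residue_numbers : List String) : Decidable (Pre_format_fragments residue_numbers) := by unfold Pre_format_fragments; infer_instance

def pvWitness_format_fragments : List String := ["1", "2", "4", "9"]

def Spec_format_fragments (residue_numbers : List String) (out : List String) : Prop := out = format_fragments_alt residue_numbers
instance (residue_numbers : List String) (out : List String) : Decidable (Spec_format_fragments residue_numbers out) := by unfold Spec_format_fragments; infer_instance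

-- ===== CLAIM (what is proved, stated in full; the proofs are below) =====
def Claim_equal_format_fragments : Prop := ∀ (residue_numbers : List String), Dom_format_fragments residue_numbers → Pre_format_fragments residue_numbers → Spec_format_fragments residue_numbers (format_fragments residue_numbers)

-- ===== LEMMAS AND PROOFS =====

-- the coupling invariant between A's fold state and B's fold state
def pvInv (a : List (List String) × List String) (b : List String × Option (String × String)) : Prop :=
  b.1 = a.1.map pvFmtA ∧
  ((a.2 = [] ∧ b.2 = none) ∨
    (a.2 ≠ [] ∧ b.2 = some (a.2.headD "", a.2.getLast?.getD "") ∧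
      (PySem.Int.ofStr? (a.2.getLast?.getD "")).getD 0 =
        (PySem.Int.ofStr? (a.2.headD "")).getD 0 + ((a.2.length : Int) - 1)))

-- on a "chain" fragment (ints increase by 1), A's and B's formatters agree
lemma pvFmt_eq (c : List String) (hc : c ≠ [])
    (hch : (PySem.Int.ofStr? (c.getLast?.getD "")).getD 0 =
      (PySem.Int.ofStr? (c.headD "")).getD 0 + ((c.length : Int) - 1)) :
    pvFmtA c = pvFmtB (c.headD "") (c.getLast?.getD "") := by
  match c, hc with
  | [x], _ => simp [pvFmtA, pvFmtB]
  | x :: y :: t, _ =>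
    have hlen : 1 < (x :: y :: t).length := by simp
    have hne : (x :: y :: t).headD "" ≠ (x :: y :: t).getLast?.getD "" := by
      intro he
      rw [he] at hch
      have hl : ((x :: y :: t).length : Int) = (t.length : Int) + 2 := by simp; ring
      omega
    rw [pvFmtA, pvFmtB, if_pos hlen, if_neg hne]

lemma pvStep_inv (a : List (List String) × List String)
    (b : List String × Option (String × String)) (num : String)
    (h : pvInv a b) : pvInv (pvStepA a num) (pvStepB b num) := by
  obtain ⟨hb1, hcase⟩ := h
  rcases hcase with ⟨ha2, hb2⟩ | ⟨hne, hb2, hch⟩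
  · -- current fragment empty, B state none
    refine ⟨by simpa [pvStepA, pvStepB, ha2, hb2], Or.inr ?_⟩
    simp [pvStepA, pvStepB, ha2, hb2]
  · -- current fragment c ≠ [], B state some (head c, last c)
    by_cases hcond : (PySem.Int.ofStr? num).getD 0 = (PySem.Int.ofStr? (a.2.getLast?.getD "")).getD 0 + 1
    · -- extend the run
      have hA : pvStepA a num = (a.1, a.2 ++ [num]) := by
        simp [pvStepA, hcond]
      have hB : pvStepB b num = (b.1, some (a.2.headD "", num)) := by
        simp [pvStepB, hb2, hcond]
      refine ⟨by simp [hA, hB, hb1], Or.inr ?_⟩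
      rw [hA, hB]
      have h1 : (a.2 ++ [num]).getLast?.getD "" = num := by simp
      have h2 : (a.2 ++ [num]).headD "" = a.2.headD "" := by
        rcases List.exists_cons_of_ne_nil hne with ⟨z, zs, hz⟩
        rw [hz]; simp
      refine ⟨by simp, by rw [h1, h2], ?_⟩
      simp only [h1, h2]
      rw [hcond, hch]
      have hl : ((a.2 ++ [num]).length : Int) = (a.2.length : Int) + 1 := by
        simp
      rw [hl]
      ring
    · -- break: emit the finished run
      have hA : pvStepA a num = (a.1 ++ [a.2], [num]) := by
        simp [pvStepA, hcond, hne]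
      have hB : pvStepB b num =
          (b.1 ++ [pvFmtB (a.2.headD "") (a.2.getLast?.getD "")], some (num, num)) := by
        simp [pvStepB, hb2, hcond]
      refine ⟨?_, Or.inr ?_⟩
      · rw [hA, hB, hb1]
        simp [pvFmt_eq a.2 hne hch]
      · simp [hA, hB]

lemma pvFold_inv (xs : List String) (a : List (List String) × List String)
    (b : List String × Option (String × String)) (h : pvInv a b) :
    pvInv (xs.foldl pvStepA a) (xs.foldl pvStepB b) := by
  induction xs generalizing a b with
  | nil => exact h
  | cons x xs ih => exact ih _ _ (pvStep_inv a b x h)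

-- ===== VERDICT (by name: the statement is the Claim_ definition above) =====
theorem format_fragments_spec : Claim_equal_format_fragments := by
  intro rs _ _
  unfold Spec_format_fragments format_fragments format_fragments_alt
  have h := pvFold_inv rs ([], []) ([], none) (by simp [pvInv])
  obtain ⟨hb1, hcase⟩ := h
  rcases hcase with ⟨ha2, hb2⟩ | ⟨hne, hb2, hch⟩
  · simp only [ha2, hb2, hb1]
    rw [PySem.List.foldl_append_singleton_eq_map]
    simp
  · simp only [hb2, if_neg hne, hb1]
    rw [PySem.List.foldl_append_singleton_eq_map, ← pvFmt_eq _ hne hch]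
    simp
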